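-- pv_equiv track=rewrite | github.com/Yeounui/Study | Assignments/Informatics/Lecture 9/Programming Assignments 1/Antimagic_squares.py | hetero
-- ===== SOURCE A (Python) =====
-- def numbers(group):
--     result = set()
--     for line in group:
--         result.update(line)
--     return result
--
-- def sums(group):
--     element1 = 0
--     element2 = 0
--     element3 = 0
--     element4 = 0
--     result = set()
--     for oneorbit in range(len(group)):
--         for twoorbit in range(len(group)):
--             element1 += group[oneorbit][twoorbit]
--             element2 += group[twoorbit][oneorbit]
--         result.add(element1)
--         result.add(element2)
--         element1 = 0
--         element2 = 0
--     for orbit in range(len(group)):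
--         element3 += group[orbit][orbit]
--         element4 += group[orbit][len(group)-orbit-1]
--     result.add(element3)
--     result.add(element4)
--     element3 = 0
--     element4 = 0
--     return result
--
-- def hetero(group):
--     result = list()
--     for queue in group:
--         result += queue
--     if len(result) != len(numbers(group)):
--         return False
--     else:
--         if len(sums(group)) == (len(group)+1)*2:
--             return True
--         else:
--             return False
-- ===== SOURCE B (Python) =====
-- # Distinctness via sort + adjacent scan on explicit line-sum lists, instead of set-size comparisons.
-- def hetero(group):
--     n = len(group)
--     flat = [x for row in group for x in row]
--     s = sorted(flat)
--     if any(x == y for x, y in zip(s, s[1:])):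
--         return False
--     lines = [sum(group[i][j] for j in range(n)) for i in range(n)]
--     lines += [sum(group[i][j] for i in range(n)) for j in range(n)]
--     lines.append(sum(group[i][i] for i in range(n)))
--     lines.append(sum(group[i][n - 1 - i] for i in range(n)))
--     t = sorted(lines)
--     return not any(x == y for x, y in zip(t, t[1:]))
-- ===== Notes on version B (the rewrite author's own statement) =====
-- stated objective: alternative
-- what changed: B replaces A's set-cardinality comparisons (building Python sets of entries and of interleaved line sums) by building the 2n+2 line sums as an explicit list and checking distinctness of the flattened entries and of that list by sorting and scanning adjacent pairs.
import Mathlib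
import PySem

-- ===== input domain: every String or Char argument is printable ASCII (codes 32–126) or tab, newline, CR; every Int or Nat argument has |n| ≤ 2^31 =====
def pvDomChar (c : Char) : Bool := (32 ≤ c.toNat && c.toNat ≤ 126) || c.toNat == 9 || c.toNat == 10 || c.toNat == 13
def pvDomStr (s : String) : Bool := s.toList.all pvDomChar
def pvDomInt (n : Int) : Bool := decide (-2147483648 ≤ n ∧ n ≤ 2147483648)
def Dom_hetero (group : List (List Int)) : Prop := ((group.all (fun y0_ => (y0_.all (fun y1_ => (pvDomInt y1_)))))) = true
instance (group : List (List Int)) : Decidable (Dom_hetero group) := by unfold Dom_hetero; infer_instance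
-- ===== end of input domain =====

-- B checks distinctness by sorting and scanning adjacent pairs over explicit line-sum lists,
-- instead of A's set-size comparisons; objective: alternative (same cost, different mechanism).

-- ===== PORT A =====
def pyNumbers (group : List (List Int)) : PySem.Set Int :=
  group.foldl (fun result line => PySem.Set.update result line) PySem.Set.empty

def pySums (group : List (List Int)) : PySem.Set Int :=
  let n : Int := group.length
  let result : PySem.Set Int :=
    (PySem.List.pyRange 0 n).foldl (fun result oneorbit =>
      let e := (PySem.List.pyRange 0 n).foldl (fun (e : Int × Int) twoorbit =>
          (e.1 + PySem.List.pyGetD (PySem.List.pyGetD group oneorbit []) twoorbit 0,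
           e.2 + PySem.List.pyGetD (PySem.List.pyGetD group twoorbit []) oneorbit 0)) (0, 0)
      PySem.Set.add (PySem.Set.add result e.1) e.2) PySem.Set.empty
  let e3 := (PySem.List.pyRange 0 n).foldl (fun a orbit =>
      a + PySem.List.pyGetD (PySem.List.pyGetD group orbit []) orbit 0) 0
  let e4 := (PySem.List.pyRange 0 n).foldl (fun a orbit =>
      a + PySem.List.pyGetD (PySem.List.pyGetD group orbit []) (n - orbit - 1) 0) 0
  PySem.Set.add (PySem.Set.add result e3) e4

def hetero (group : List (List Int)) : Bool :=
  let result : List Int := group.foldl (fun acc queue => acc ++ queue) []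
  if result.length ≠ (pyNumbers group).length then false
  else if (pySums group).length = (group.length + 1) * 2 then true else false

-- ===== PORT B =====
def hetero_alt (group : List (List Int)) : Bool :=
  let n : Int := group.length
  let flat : List Int := group.flatMap (fun row => row)
  let s := PySem.List.sorted flat (fun x => x)
  if (s.zip s.tail).any (fun p => p.1 == p.2) then false
  else
    let lines : List Int :=
      ((PySem.List.pyRange 0 n).map (fun i =>
        (PySem.List.pyRange 0 n).foldl (fun a j =>
          a + PySem.List.pyGetD (PySem.List.pyGetD group i []) j 0) 0)
      ++ (PySem.List.pyRange 0 n).map (fun j =>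
        (PySem.List.pyRange 0 n).foldl (fun a i =>
          a + PySem.List.pyGetD (PySem.List.pyGetD group i []) j 0) 0))
      ++ [(PySem.List.pyRange 0 n).foldl (fun a i =>
            a + PySem.List.pyGetD (PySem.List.pyGetD group i []) i 0) 0,
          (PySem.List.pyRange 0 n).foldl (fun a i =>
            a + PySem.List.pyGetD (PySem.List.pyGetD group i []) (n - 1 - i) 0) 0]
    let t := PySem.List.sorted lines (fun x => x)
    !(t.zip t.tail).any (fun p => p.1 == p.2)

-- ===== PRECONDITION & SPEC =====
-- Pre_ excludes exactly the grids on which Python A raises IndexError: a row shorter than the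
-- number of rows is indexed in sums() unless a duplicate entry made hetero return False first.
def Pre_hetero (group : List (List Int)) : Prop :=
  ¬ (group.flatMap (fun row => row)).Nodup ∨ ∀ row ∈ group, group.length ≤ row.length
instance (group : List (List Int)) : Decidable (Pre_hetero group) := by unfold Pre_hetero; infer_instance
def pvWitness_hetero : List (List Int) := [[1, 2], [4, 8]]

def Spec_hetero (group : List (List Int)) (out : Bool) : Prop := out = hetero_alt group
instance (group : List (List Int)) (out : Bool) : Decidable (Spec_hetero group out) := by unfold Spec_hetero; infer_instance

-- ===== CLAIM (what is proved, stated in full; the proofs are below) =====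
def Claim_equal_hetero : Prop := ∀ (group : List (List Int)), Dom_hetero group → Pre_hetero group → Spec_hetero group (hetero group)

-- ===== LEMMAS AND PROOFS =====

-- set(xs) has as many elements as xs exactly when xs has no duplicates
lemma ofList_length_eq_iff (L : List Int) : (PySem.Set.ofList L).length = L.length ↔ L.Nodup := by
  have hperm : (PySem.Set.ofList L).Perm L.dedup := by
    rw [List.perm_ext_iff_of_nodup (PySem.Set.nodup_ofList L) L.nodup_dedup]
    intro a
    simp [PySem.Set.mem_ofList, List.mem_dedup]
  have hlen : (PySem.Set.ofList L).length = L.dedup.length := hperm.length_eq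
  constructor
  · intro h
    have hd : L.dedup = L := (L.dedup_sublist).eq_of_length (by omega)
    exact List.dedup_eq_self.mp hd
  · intro h
    rw [hlen, List.dedup_eq_self.mpr h]

-- the adjacent-pair scan of B is the no-adjacent-duplicate predicate
lemma scan_eq_chain (s : List Int) :
    ((s.zip s.tail).any (fun p => p.1 == p.2) = false) ↔ List.IsChain (· ≠ ·) s := by
  induction s with
  | nil => simp
  | cons a t ih =>
    cases t with
    | nil => simp
    | cons b t' =>
      simp only [List.tail_cons, List.zip_cons_cons, List.any_cons, List.isChain_cons_cons,
        Bool.or_eq_false_iff, beq_eq_false_iff_ne, ne_eq] at *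
      exact and_congr Iff.rfl ih

lemma chain_lt_of (s : List Int) (h1 : s.Pairwise (· ≤ ·)) (h2 : List.IsChain (· ≠ ·) s) :
    List.IsChain (· < ·) s := by
  induction s with
  | nil => simp
  | cons a t ih =>
    cases t with
    | nil => simp
    | cons b t' =>
      rw [List.isChain_cons_cons] at h2 ⊢
      rw [List.pairwise_cons] at h1
      exact ⟨lt_of_le_of_ne (h1.1 b (by simp)) h2.1, ih h1.2 h2.2⟩

-- sort + adjacent scan finds no duplicate exactly when the list has none
lemma sortedScan (xs : List Int) :
    (((PySem.List.sorted xs (fun x => x)).zip (PySem.List.sorted xs (fun x => x)).tail).any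
      (fun p => p.1 == p.2) = false) ↔ xs.Nodup := by
  rw [scan_eq_chain]
  have hp := PySem.List.sorted_pairwise xs (fun x => x)
  have hperm := PySem.List.sorted_perm xs (fun x => x) false
  constructor
  · intro hch
    rw [← hperm.nodup_iff]
    exact ((chain_lt_of _ hp hch).pairwise).imp ne_of_lt
  · intro hnd
    exact List.Pairwise.isChain (hperm.nodup_iff.mpr hnd)

lemma foldl_update_eq (group : List (List Int)) :
    ∀ s : PySem.Set Int,
      group.foldl (fun r line => PySem.Set.update r line) s
        = s.update (group.flatMap (fun row => row)) := by
  induction group with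
  | nil => intro s; simp [PySem.Set.update_nil]
  | cons a l ih => intro s; simp [List.flatMap_cons, PySem.Set.update_append, ih]

lemma pyNumbers_eq (group : List (List Int)) :
    pyNumbers group = PySem.Set.ofList (group.flatMap (fun row => row)) := by
  rw [pyNumbers, foldl_update_eq, PySem.Set.update_empty]

lemma foldl_addtwo (r c : Int → Int) (l : List Int) :
    ∀ s : PySem.Set Int,
      l.foldl (fun res i => PySem.Set.add (PySem.Set.add res (r i)) (c i)) s
        = s.update (l.flatMap fun i => [r i, c i]) := by
  induction l with
  | nil => intro s; simp [PySem.Set.update_nil]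
  | cons a l ih =>
    intro s
    simp [List.flatMap_cons, PySem.Set.update_cons, ih]

lemma interleave_perm (r c : Int → Int) (l : List Int) :
    (l.flatMap fun i => [r i, c i]).Perm (l.map r ++ l.map c) := by
  induction l with
  | nil => simp
  | cons a l ih =>
    simp only [List.flatMap_cons, List.map_cons, List.cons_append]
    exact ((ih.cons (c a)).cons (r a)).trans (List.perm_middle.symm.cons (r a))

def linesA (group : List (List Int)) : List Int :=
  ((PySem.List.pyRange 0 (group.length : Int)).flatMap fun i =>
    [(PySem.List.pyRange 0 (group.length : Int)).foldl (fun a j =>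
        a + PySem.List.pyGetD (PySem.List.pyGetD group i []) j 0) 0,
     (PySem.List.pyRange 0 (group.length : Int)).foldl (fun a j =>
        a + PySem.List.pyGetD (PySem.List.pyGetD group j []) i 0) 0])
  ++ [(PySem.List.pyRange 0 (group.length : Int)).foldl (fun a i =>
        a + PySem.List.pyGetD (PySem.List.pyGetD group i []) i 0) 0,
      (PySem.List.pyRange 0 (group.length : Int)).foldl (fun a i =>
        a + PySem.List.pyGetD (PySem.List.pyGetD group i []) ((group.length : Int) - 1 - i) 0) 0]

def linesB (group : List (List Int)) : List Int :=
  ((PySem.List.pyRange 0 (group.length : Int)).map (fun i =>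
    (PySem.List.pyRange 0 (group.length : Int)).foldl (fun a j =>
      a + PySem.List.pyGetD (PySem.List.pyGetD group i []) j 0) 0)
  ++ (PySem.List.pyRange 0 (group.length : Int)).map (fun j =>
    (PySem.List.pyRange 0 (group.length : Int)).foldl (fun a i =>
      a + PySem.List.pyGetD (PySem.List.pyGetD group i []) j 0) 0))
  ++ [(PySem.List.pyRange 0 (group.length : Int)).foldl (fun a i =>
        a + PySem.List.pyGetD (PySem.List.pyGetD group i []) i 0) 0,
      (PySem.List.pyRange 0 (group.length : Int)).foldl (fun a i =>
        a + PySem.List.pyGetD (PySem.List.pyGetD group i []) ((group.length : Int) - 1 - i) 0) 0]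

lemma pairfold_eq (group : List (List Int)) (i : Int) (l : List Int) :
    l.foldl (fun (e : Int × Int) two =>
        (e.1 + PySem.List.pyGetD (PySem.List.pyGetD group i []) two 0,
         e.2 + PySem.List.pyGetD (PySem.List.pyGetD group two []) i 0)) (0, 0)
      = (l.foldl (fun a two => a + PySem.List.pyGetD (PySem.List.pyGetD group i []) two 0) 0,
         l.foldl (fun a two => a + PySem.List.pyGetD (PySem.List.pyGetD group two []) i 0) 0) :=
  PySem.List.foldl_prod_mk
    (fun a two => a + PySem.List.pyGetD (PySem.List.pyGetD group i []) two 0)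
    (fun a two => a + PySem.List.pyGetD (PySem.List.pyGetD group two []) i 0) l 0 0

lemma pySums_eq (group : List (List Int)) :
    pySums group = PySem.Set.ofList (linesA group) := by
  have hfun : (fun (a i : Int) =>
      a + PySem.List.pyGetD (PySem.List.pyGetD group i []) ((group.length : Int) - i - 1) 0)
      = (fun (a i : Int) =>
      a + PySem.List.pyGetD (PySem.List.pyGetD group i []) ((group.length : Int) - 1 - i) 0) := by
    funext a i
    rw [sub_right_comm]
  unfold pySums
  simp only [pairfold_eq, hfun]
  rw [foldl_addtwo, PySem.Set.update_empty, ← PySem.Set.ofList_append_singleton,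
    ← PySem.Set.ofList_append_singleton, linesA, List.append_assoc]
  rfl

lemma linesA_perm (group : List (List Int)) : (linesA group).Perm (linesB group) := by
  unfold linesA linesB
  exact (interleave_perm _ _ _).append_right _

lemma linesB_length (group : List (List Int)) :
    (linesB group).length = (group.length + 1) * 2 := by
  unfold linesB
  simp [PySem.List.length_pyRange_one]
  omega

lemma branch_eq (n2 : Nat) (LA LB : List Int) (hperm : LA.Perm LB) (hlen : LB.length = n2) :
    (if (PySem.Set.ofList LA).length = n2 then true else false)
      = !((PySem.List.sorted LB (fun x => x)).zip
          (PySem.List.sorted LB (fun x => x)).tail).any (fun p => p.1 == p.2) := by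
  by_cases h : LB.Nodup
  · rw [if_pos, (sortedScan LB).mpr h, Bool.not_false]
    have hl : (PySem.Set.ofList LA).length = LA.length :=
      (ofList_length_eq_iff LA).mpr (hperm.nodup_iff.mpr h)
    rw [hl, hperm.length_eq, hlen]
  · have hb : ((PySem.List.sorted LB (fun x => x)).zip
        (PySem.List.sorted LB (fun x => x)).tail).any (fun p => p.1 == p.2) = true := by
      rcases Bool.eq_false_or_eq_true (((PySem.List.sorted LB (fun x => x)).zip
        (PySem.List.sorted LB (fun x => x)).tail).any (fun p => p.1 == p.2)) with hc | hc
      · exact hc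
      · exact absurd ((sortedScan LB).mp hc) h
    rw [hb, if_neg, Bool.not_true]
    intro hc
    apply h
    rw [← hperm.nodup_iff]
    apply (ofList_length_eq_iff LA).mp
    rw [hc, ← hlen, hperm.length_eq]

-- ===== VERDICT (by name: the statement is the Claim_ definition above) =====
theorem hetero_spec : Claim_equal_hetero := by
  intro group _ _
  have hflat : group.foldl (fun acc queue => acc ++ queue) ([]:List Int)
      = group.flatMap (fun row => row) := by
    simpa using PySem.List.foldl_append_eq_flatMap (fun x => x) group []
  unfold Spec_hetero hetero hetero_alt
  simp only [hflat, pyNumbers_eq]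
  by_cases hnd : (group.flatMap (fun row => row)).Nodup
  · have hA := (ofList_length_eq_iff (group.flatMap fun row => row)).mpr hnd
    have hB := (sortedScan (group.flatMap fun row => row)).mpr hnd
    rw [if_neg (fun hc => hc hA.symm), hB, if_neg Bool.false_ne_true, pySums_eq]
    have h := branch_eq ((group.length + 1) * 2) (linesA group) (linesB group)
      (linesA_perm group) (linesB_length group)
    simpa only [linesB] using h
  · have hA : (group.flatMap fun row => row).length
        ≠ List.length (PySem.Set.ofList (group.flatMap fun row => row)) :=
      fun hc => hnd ((ofList_length_eq_iff _).mp hc.symm)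
    have hB : (((PySem.List.sorted (group.flatMap fun row => row) (fun x => x)).zip
        (PySem.List.sorted (group.flatMap fun row => row) (fun x => x)).tail).any
          (fun p => p.1 == p.2)) = true := by
      rcases Bool.eq_false_or_eq_true (((PySem.List.sorted (group.flatMap fun row => row) (fun x => x)).zip
        (PySem.List.sorted (group.flatMap fun row => row) (fun x => x)).tail).any
          (fun p => p.1 == p.2)) with hc | hc
      · exact hc
      · exact absurd ((sortedScan _).mp hc) hnd
    rw [if_pos hA, if_pos hB]
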